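-- pv_equiv track=rewrite | github.com/jmeyer1980/yorkz-nd-mem-experiment | src/yorkz/memory_system.py | canonical_tag_map
-- ===== SOURCE A (Python) =====
-- CANONICAL_TAG_PREFIXES = ("topic", "scope", "kind", "layer")
--
-- def canonical_tag_map(tags: list[str]) -> dict[str, set[str]]:
--     grouped: dict[str, set[str]] = {prefix: set() for prefix in CANONICAL_TAG_PREFIXES}
--     for tag in tags:
--         if ":" not in tag:
--             continue
--         prefix, value = tag.split(":", 1)
--         if prefix in grouped and value:
--             grouped[prefix].add(value)
--     return grouped
-- ===== SOURCE B (Python) =====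
-- CANONICAL_TAG_PREFIXES = ("topic", "scope", "kind", "layer")
--
-- def canonical_tag_map(tags: list[str]) -> dict[str, set[str]]:
--     return {
--         prefix: {tag[len(prefix) + 1:] for tag in tags
--                  if tag.startswith(prefix + ":") and len(tag) > len(prefix) + 1}
--         for prefix in CANONICAL_TAG_PREFIXES
--     }
-- ===== Notes on version B (the rewrite author's own statement) =====
-- stated objective: idiomatic
-- what changed: A single pass that splits each tag at its first colon and dispatches into pre-built mutable buckets is replaced by a dict comprehension over the canonical prefixes, each key's set built by its own startswith-filtered scan of the tags with the value taken by slicing past the prefix.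
import Mathlib
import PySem

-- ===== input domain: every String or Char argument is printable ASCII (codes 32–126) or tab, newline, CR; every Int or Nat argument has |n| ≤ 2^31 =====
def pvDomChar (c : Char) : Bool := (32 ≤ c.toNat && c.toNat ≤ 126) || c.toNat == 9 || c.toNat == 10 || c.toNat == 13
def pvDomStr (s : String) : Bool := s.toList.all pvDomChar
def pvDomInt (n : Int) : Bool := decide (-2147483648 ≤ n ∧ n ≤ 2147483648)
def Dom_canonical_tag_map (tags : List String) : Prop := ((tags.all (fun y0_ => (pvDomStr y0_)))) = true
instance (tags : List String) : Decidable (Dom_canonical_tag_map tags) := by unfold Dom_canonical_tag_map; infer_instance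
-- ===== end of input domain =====

-- B replaces A's single split-and-dispatch pass over the tags with a per-prefix map building each
-- bucket by its own startswith-filtered scan (idiomatic dict-comprehension decomposition).

-- CANONICAL_TAG_PREFIXES, shared module constant of both implementations
def pvPrefixes : List String := ["topic", "scope", "kind", "layer"]

-- ===== PORT A =====
-- loop body of A: skip tags without ':', split at the first ':', add the value to its bucket
def pvStepA (d : PySem.Dict String (PySem.Set String)) (tag : String) :
    PySem.Dict String (PySem.Set String) :=
  if PySem.Str.isIn ":" tag = false then d
  else
    match PySem.Str.splitMax? tag ":" 1 with
    | some (pre :: value :: _) =>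
        if d.contains pre && value != "" then
          d.modify pre PySem.Set.empty (fun s => PySem.Set.add s value)
        else d
    | _ => d

def canonical_tag_map (tags : List String) : List (String × List String) :=
  (tags.foldl pvStepA
    (pvPrefixes.foldl (fun d p => d.insert p PySem.Set.empty) PySem.Dict.empty)).items

-- ===== PORT B =====
def canonical_tag_map_alt (tags : List String) : List (String × List String) :=
  pvPrefixes.map (fun p =>
    (p, PySem.Set.ofList ((tags.filter (fun t =>
            PySem.Str.startswith t (p ++ ":") && PySem.Str.len p + 1 < PySem.Str.len t)).map
          (fun t => PySem.Str.slice t (some (PySem.Str.len p + 1)) none))))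

-- ===== PRECONDITION & SPEC =====
def Spec_canonical_tag_map (tags : List String) (out : List (String × List String)) : Prop := out = canonical_tag_map_alt tags
instance (tags : List String) (out : List (String × List String)) : Decidable (Spec_canonical_tag_map tags out) := by unfold Spec_canonical_tag_map; infer_instance

-- ===== CLAIM (what is proved, stated in full; the proofs are below) =====
def Claim_equal_canonical_tag_map : Prop := ∀ (tags : List String), Dom_canonical_tag_map tags → Spec_canonical_tag_map tags (canonical_tag_map tags)

-- ===== LEMMAS AND PROOFS =====

lemma pv_go_zero (fuel : Nat) (l cur : List Char) (acc : List (List Char)) :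
    PySem.Chars.splitOnMax.go [':'] fuel 0 l cur acc = ((cur.reverse ++ l) :: acc).reverse := by
  cases fuel with
  | zero => rw [PySem.Chars.splitOnMax.go.eq_def]
  | succ f =>
    cases l with
    | nil => rw [PySem.Chars.splitOnMax.go.eq_def]; simp
    | cons c r => rw [PySem.Chars.splitOnMax.go.eq_def]; simp

lemma pv_go_one : ∀ (l : List Char) (fuel : Nat) (cur : List Char) (acc : List (List Char)), l.length < fuel →
    PySem.Chars.splitOnMax.go [':'] fuel 1 l cur acc =
      if ':' ∈ l then
        acc.reverse ++ [cur.reverse ++ l.takeWhile (· ≠ ':'), (l.dropWhile (· ≠ ':')).tail]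
      else acc.reverse ++ [cur.reverse ++ l] := by
  intro l
  induction l with
  | nil =>
    intro fuel cur acc hf
    match fuel, hf with
    | fuel+1, _ => rw [PySem.Chars.splitOnMax.go.eq_def]; simp
  | cons c r ih =>
    intro fuel cur acc hf
    match fuel, hf with
    | fuel+1, hf =>
      rw [PySem.Chars.splitOnMax.go.eq_def]
      simp only []
      by_cases hc : c = ':'
      · subst hc
        have hpre : [':'].isPrefixOf (':' :: r) = true := by simp [List.isPrefixOf]
        simp only [hpre, if_pos]
        rw [if_neg (by omega), pv_go_zero]
        simp [List.takeWhile, List.dropWhile]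
      · have hpre : [':'].isPrefixOf (c :: r) = false := by simp [List.isPrefixOf]; exact fun h => hc h.symm
        simp only [hpre]
        rw [if_neg (by omega)]
        simp only [Bool.false_eq_true, if_false]
        rw [ih fuel (c :: cur) acc (by simpa using Nat.lt_of_succ_lt_succ hf)]
        by_cases hm : ':' ∈ r
        · rw [if_pos hm, if_pos (by simp [hm])]
          simp [List.takeWhile, List.dropWhile, hc]
        · rw [if_neg hm, if_neg (by simp [Ne.symm hc, hm])]
          simp

lemma pv_splitOnMax_spec (l : List Char) (h : ':' ∈ l) :
    PySem.Chars.splitOnMax l [':'] 1 =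
      [l.takeWhile (· ≠ ':'), (l.dropWhile (· ≠ ':')).tail] := by
  rw [PySem.Chars.splitOnMax.eq_1]
  rw [if_neg (by omega)]
  rw [show (1:Int).toNat = 1 from rfl]
  rw [pv_go_one l (l.length + 1) [] [] (by omega)]
  simp [h]

lemma pv_split_str (tag : String) (h : ':' ∈ tag.toList) :
    PySem.Str.splitMax? tag ":" 1 =
      some [String.ofList (tag.toList.takeWhile (· ≠ ':')),
            String.ofList ((tag.toList.dropWhile (· ≠ ':')).tail)] := by
  have hb := PySem.Str.splitMax?_map tag ":" 1
  rw [show (":" : String).toList = [':'] from rfl] at hb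
  rw [show PySem.Chars.splitMax? tag.toList [':'] 1
      = some (PySem.Chars.splitOnMax tag.toList [':'] 1) from by simp [PySem.Chars.splitMax?]] at hb
  rw [pv_splitOnMax_spec _ h] at hb
  cases ho : PySem.Str.splitMax? tag ":" 1 with
  | none => rw [ho] at hb; simp at hb
  | some L =>
    rw [ho] at hb
    simp only [Option.map_some, Option.some.injEq] at hb
    cases L with
    | nil => simp at hb
    | cons x L1 =>
      cases L1 with
      | nil => simp at hb
      | cons y L2 =>
        cases L2 with
        | cons z L3 => simp at hb
        | nil =>
          simp only [List.map_cons, List.map_nil, List.cons.injEq, and_true] at hb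
          obtain ⟨hx, hy⟩ := hb
          congr 2
          · rw [← hx]; simp
          · rw [← hy]; simp

lemma pv_decomp (l : List Char) (h : ':' ∈ l) :
    l = l.takeWhile (· ≠ ':') ++ ':' :: (l.dropWhile (· ≠ ':')).tail := by
  have hne : l.dropWhile (· ≠ ':') ≠ [] := by
    intro he
    rw [List.dropWhile_eq_nil_iff] at he
    exact absurd (he _ h) (by simp)
  have hhead : (l.dropWhile (· ≠ ':')).head hne = ':' := by
    have := List.head_dropWhile_not (fun c : Char => decide (c ≠ ':')) hne
    simpa using this
  conv_lhs => rw [← List.takeWhile_append_dropWhile (p := fun c : Char => decide (c ≠ ':')) (l := l),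
    ← List.cons_head_tail hne, hhead]

lemma pv_pref_iff : ∀ (l u : List Char), ':' ∉ u →
    ((u ++ [':']) <+: l ↔ (':' ∈ l ∧ l.takeWhile (· ≠ ':') = u)) := by
  intro l
  induction l with
  | nil =>
    intro u hu
    simp
  | cons c r ih =>
    intro u hu
    cases u with
    | nil =>
      by_cases hc : c = ':'
      · subst hc
        simp
      · constructor
        · intro hp
          rw [List.nil_append, List.cons_prefix_cons] at hp
          exact absurd hp.1.symm hc
        · rintro ⟨h1, h2⟩
          rw [List.takeWhile_cons, if_pos (by simpa using hc)] at h2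
          simp at h2
    | cons d us =>
      have hd : d ≠ ':' := by intro he; exact hu (by simp [he])
      have hus : ':' ∉ us := by intro hm; exact hu (by simp [hm])
      by_cases hcd : c = d
      · subst hcd
        rw [List.cons_append, List.cons_prefix_cons]
        simp only [true_and]
        rw [ih us hus]
        rw [List.takeWhile_cons, if_pos (by simpa using hd)]
        constructor
        · rintro ⟨h1, h2⟩
          exact ⟨by simp [h1], by simpa using h2⟩
        · rintro ⟨h1, h2⟩
          simp only [List.cons.injEq, true_and] at h2
          refine ⟨?_, h2⟩
          rcases List.mem_cons.mp h1 with h1 | h1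
          · exact absurd h1.symm hd
          · exact h1
      · constructor
        · intro hp
          rw [List.cons_append, List.cons_prefix_cons] at hp
          exact absurd hp.1.symm hcd
        · rintro ⟨h1, h2⟩
          by_cases hc : c = ':'
          · rw [List.takeWhile_cons, if_neg (by simp [hc])] at h2
            exact absurd h2.symm (by simp)
          · rw [List.takeWhile_cons, if_pos (by simpa using hc)] at h2
            simp only [List.cons.injEq] at h2
            exact absurd h2.1 hcd

def pvKeep (p t : String) : Bool :=
  PySem.Str.startswith t (p ++ ":") && PySem.Str.len p + 1 < PySem.Str.len t
def pvVal (p t : String) : String := PySem.Str.slice t (some (PySem.Str.len p + 1)) none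
def pvSel (p : String) (tags : List String) : List String :=
  (tags.filter (pvKeep p)).map (pvVal p)

lemma pv_startswith_iff (p tag : String) :
    PySem.Str.startswith tag (p ++ ":") = true ↔ (p.toList ++ [':']) <+: tag.toList := by
  rw [PySem.Str.startswith_eq, PySem.Chars.startswith_iff]
  simp

lemma pv_keep_false_of_no_colon (p tag : String) (h : ':' ∉ tag.toList) :
    pvKeep p tag = false := by
  have hsw : PySem.Str.startswith tag (p ++ ":") = false := by
    rw [← Bool.not_eq_true, pv_startswith_iff]
    intro hp
    exact h (hp.subset (by simp))
  rw [pvKeep, hsw, Bool.false_and]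

lemma pv_len_decomp (tag : String) (h : ':' ∈ tag.toList) :
    tag.toList.length
      = (tag.toList.takeWhile (· ≠ ':')).length + 1 + ((tag.toList.dropWhile (· ≠ ':')).tail).length := by
  conv_lhs => rw [pv_decomp tag.toList h]
  simp only [List.length_append, List.length_cons]
  omega

lemma pv_keep_iff (p tag : String) (hp : ':' ∉ p.toList) (h : ':' ∈ tag.toList) :
    pvKeep p tag = true ↔
      (tag.toList.takeWhile (· ≠ ':') = p.toList ∧ (tag.toList.dropWhile (· ≠ ':')).tail ≠ []) := by
  rw [pvKeep, Bool.and_eq_true, pv_startswith_iff, pv_pref_iff _ _ hp]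
  have hlen := pv_len_decomp tag h
  constructor
  · rintro ⟨⟨-, h2⟩, h3⟩
    refine ⟨h2, ?_⟩
    simp only [PySem.Str.len, decide_eq_true_eq, ← String.length_toList] at h3
    intro he
    rw [he] at hlen
    rw [h2] at hlen
    simp only [List.length_nil] at hlen
    omega
  · rintro ⟨h2, h3⟩
    refine ⟨⟨h, h2⟩, ?_⟩
    simp only [PySem.Str.len, decide_eq_true_eq, ← String.length_toList]
    rw [h2] at hlen
    have hpos := List.length_pos_iff.mpr h3
    push_cast
    omega

lemma pv_val_eq (p tag : String) (h : ':' ∈ tag.toList)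
    (htake : tag.toList.takeWhile (· ≠ ':') = p.toList) :
    pvVal p tag = String.ofList ((tag.toList.dropWhile (· ≠ ':')).tail) := by
  rw [pvVal]
  have h1 : (PySem.Str.slice tag (some (PySem.Str.len p + 1)) none).toList
      = PySem.Chars.slice tag.toList (some (PySem.Str.len p + 1)) none := PySem.Str.toList_slice ..
  rw [PySem.Chars.slice_eq_listSlice] at h1
  rw [PySem.List.slice_from _ (by simp only [PySem.Str.len]; positivity)] at h1
  have h2 : (PySem.Str.len p + 1).toNat = p.toList.length + 1 := by
    simp only [PySem.Str.len, ← String.length_toList]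
    omega
  rw [h2] at h1
  have h3 : tag.toList.drop (p.toList.length + 1) = (tag.toList.dropWhile (· ≠ ':')).tail := by
    conv_lhs => rw [pv_decomp tag.toList h, htake]
    rw [show (p.toList : List Char) ++ ':' :: (tag.toList.dropWhile (· ≠ ':')).tail
        = (p.toList ++ [':']) ++ (tag.toList.dropWhile (· ≠ ':')).tail from by simp,
      show p.toList.length + 1 = (p.toList ++ [':']).length from by simp]
    exact List.drop_left
  apply String.toList_injective
  rw [h1, h3]
  simp


lemma pv_singleton_infix (c : Char) (l : List Char) : [c] <:+: l ↔ c ∈ l := by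
  constructor
  · rintro ⟨s, t, rfl⟩
    simp
  · intro h
    obtain ⟨s, t, rfl⟩ := List.append_of_mem h
    exact ⟨s, t, by simp⟩

lemma pv_isIn_true (tag : String) (hc : ':' ∈ tag.toList) :
    PySem.Chars.isIn [':'] tag.toList = true := by
  rw [PySem.Chars.isIn_iff_infix]
  exact (pv_singleton_infix ':' tag.toList).mpr hc

lemma pv_isIn_false (tag : String) (hc : ':' ∉ tag.toList) :
    PySem.Chars.isIn [':'] tag.toList = false := by
  rw [PySem.Chars.isIn_eq_false_iff]
  exact fun hinf => hc ((pv_singleton_infix ':' tag.toList).mp hinf)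

lemma pv_stepA_eq (d : PySem.Dict String (PySem.Set String)) (tag : String) (hc : ':' ∈ tag.toList) :
    pvStepA d tag =
      (if (d.contains (String.ofList (tag.toList.takeWhile (· ≠ ':')))
            && (String.ofList ((tag.toList.dropWhile (· ≠ ':')).tail) != "")) = true then
        d.modify (String.ofList (tag.toList.takeWhile (· ≠ ':'))) PySem.Set.empty
          (fun s => PySem.Set.add s (String.ofList ((tag.toList.dropWhile (· ≠ ':')).tail)))
      else d) := by
  rw [pvStepA, if_neg (by simp [pv_isIn_true tag hc]), pv_split_str tag hc]

lemma pv_keep_false_of_ne (p tag : String) (hp : ':' ∉ p.toList) (hc : ':' ∈ tag.toList)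
    (hne : tag.toList.takeWhile (· ≠ ':') ≠ p.toList) : pvKeep p tag = false := by
  rw [← Bool.not_eq_true, pv_keep_iff p tag hp hc]
  rintro ⟨h1, -⟩
  exact hne h1

lemma pv_keep_false_of_empty (p tag : String) (hp : ':' ∉ p.toList) (hc : ':' ∈ tag.toList)
    (hb : (tag.toList.dropWhile (· ≠ ':')).tail = []) : pvKeep p tag = false := by
  rw [← Bool.not_eq_true, pv_keep_iff p tag hp hc]
  rintro ⟨-, h2⟩
  exact h2 hb

lemma pv_step_spec (tag : String) (A B C D : PySem.Set String) :
    pvStepA (PySem.Dict.mk [("topic", A), ("scope", B), ("kind", C), ("layer", D)]) tag =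
      PySem.Dict.mk
        [("topic", if pvKeep "topic" tag then PySem.Set.add A (pvVal "topic" tag) else A),
         ("scope", if pvKeep "scope" tag then PySem.Set.add B (pvVal "scope" tag) else B),
         ("kind",  if pvKeep "kind" tag then PySem.Set.add C (pvVal "kind" tag) else C),
         ("layer", if pvKeep "layer" tag then PySem.Set.add D (pvVal "layer" tag) else D)] := by
  by_cases hc : ':' ∈ tag.toList
  · rw [pv_stepA_eq _ tag hc]
    by_cases hy : (tag.toList.dropWhile (· ≠ ':')).tail = []
    · rw [if_neg (by simp; intro _; simpa using hy)]
      rw [pv_keep_false_of_empty "topic" tag (by decide) hc hy,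
          pv_keep_false_of_empty "scope" tag (by decide) hc hy,
          pv_keep_false_of_empty "kind" tag (by decide) hc hy,
          pv_keep_false_of_empty "layer" tag (by decide) hc hy]
      simp
    · have hyne : (String.ofList ((tag.toList.dropWhile (· ≠ ':')).tail) != "") = true := by
        simp only [bne_iff_ne, ne_eq]
        intro he
        exact hy (by simpa using congrArg String.toList he)
      by_cases h1 : tag.toList.takeWhile (· ≠ ':') = "topic".toList
      · have hk : pvKeep "topic" tag = true :=
          (pv_keep_iff "topic" tag (by decide) hc).mpr ⟨h1, hy⟩
        have hv := pv_val_eq "topic" tag hc h1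
        rw [hk, pv_keep_false_of_ne "scope" tag (by decide) hc (by rw [h1]; decide),
          pv_keep_false_of_ne "kind" tag (by decide) hc (by rw [h1]; decide),
          pv_keep_false_of_ne "layer" tag (by decide) hc (by rw [h1]; decide)]
        rw [hv, h1, show String.ofList ("topic" : String).toList = "topic" from rfl]
        rw [if_pos (by simp [PySem.Dict.contains]; simpa using hy)]
        simp [PySem.Dict.modify, PySem.Dict.insert, PySem.Dict.contains, PySem.Dict.getD,
          PySem.Dict.get?]
      by_cases h2 : tag.toList.takeWhile (· ≠ ':') = "scope".toList
      · have hk : pvKeep "scope" tag = true :=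
          (pv_keep_iff "scope" tag (by decide) hc).mpr ⟨h2, hy⟩
        have hv := pv_val_eq "scope" tag hc h2
        rw [hk, pv_keep_false_of_ne "topic" tag (by decide) hc (by rw [h2]; decide),
          pv_keep_false_of_ne "kind" tag (by decide) hc (by rw [h2]; decide),
          pv_keep_false_of_ne "layer" tag (by decide) hc (by rw [h2]; decide)]
        rw [hv, h2, show String.ofList ("scope" : String).toList = "scope" from rfl]
        rw [if_pos (by simp [PySem.Dict.contains]; simpa using hy)]
        simp [PySem.Dict.modify, PySem.Dict.insert, PySem.Dict.contains, PySem.Dict.getD,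
          PySem.Dict.get?]
      by_cases h3 : tag.toList.takeWhile (· ≠ ':') = "kind".toList
      · have hk : pvKeep "kind" tag = true :=
          (pv_keep_iff "kind" tag (by decide) hc).mpr ⟨h3, hy⟩
        have hv := pv_val_eq "kind" tag hc h3
        rw [hk, pv_keep_false_of_ne "topic" tag (by decide) hc (by rw [h3]; decide),
          pv_keep_false_of_ne "scope" tag (by decide) hc (by rw [h3]; decide),
          pv_keep_false_of_ne "layer" tag (by decide) hc (by rw [h3]; decide)]
        rw [hv, h3, show String.ofList ("kind" : String).toList = "kind" from rfl]
        rw [if_pos (by simp [PySem.Dict.contains]; simpa using hy)]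
        simp [PySem.Dict.modify, PySem.Dict.insert, PySem.Dict.contains, PySem.Dict.getD,
          PySem.Dict.get?]
      by_cases h4 : tag.toList.takeWhile (· ≠ ':') = "layer".toList
      · have hk : pvKeep "layer" tag = true :=
          (pv_keep_iff "layer" tag (by decide) hc).mpr ⟨h4, hy⟩
        have hv := pv_val_eq "layer" tag hc h4
        rw [hk, pv_keep_false_of_ne "topic" tag (by decide) hc (by rw [h4]; decide),
          pv_keep_false_of_ne "scope" tag (by decide) hc (by rw [h4]; decide),
          pv_keep_false_of_ne "kind" tag (by decide) hc (by rw [h4]; decide)]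
        rw [hv, h4, show String.ofList ("layer" : String).toList = "layer" from rfl]
        rw [if_pos (by simp [PySem.Dict.contains]; simpa using hy)]
        simp [PySem.Dict.modify, PySem.Dict.insert, PySem.Dict.contains, PySem.Dict.getD,
          PySem.Dict.get?]
      -- no canonical prefix matches: the dict lookup fails and every pvKeep is false
      have hne : ∀ q : String, tag.toList.takeWhile (· ≠ ':') ≠ q.toList →
          ((q == String.ofList (tag.toList.takeWhile (· ≠ ':'))) = false) := by
        intro q hq
        rw [beq_eq_false_iff_ne]
        intro he
        exact hq (by simpa using (congrArg String.toList he).symm)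
      rw [if_neg (by
        simp only [PySem.Dict.contains, List.any_cons, List.any_nil,
          hne _ h1, hne _ h2, hne _ h3, hne _ h4]
        simp)]
      rw [pv_keep_false_of_ne "topic" tag (by decide) hc h1,
          pv_keep_false_of_ne "scope" tag (by decide) hc h2,
          pv_keep_false_of_ne "kind" tag (by decide) hc h3,
          pv_keep_false_of_ne "layer" tag (by decide) hc h4]
      simp
  · rw [pvStepA, if_pos (by simp [pv_isIn_false tag hc])]
    rw [pv_keep_false_of_no_colon "topic" tag hc, pv_keep_false_of_no_colon "scope" tag hc,
        pv_keep_false_of_no_colon "kind" tag hc, pv_keep_false_of_no_colon "layer" tag hc]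
    simp

lemma pv_sel_cons (p t : String) (ts : List String) :
    pvSel p (t :: ts) = if pvKeep p t then pvVal p t :: pvSel p ts else pvSel p ts := by
  rw [pvSel, pvSel, List.filter_cons]
  by_cases h : pvKeep p t
  · rw [if_pos h, if_pos h, List.map_cons]
  · rw [if_neg (by simp [h]), if_neg h]

lemma pv_foldl_sel_cons (p t : String) (ts : List String) (S : PySem.Set String) :
    (pvSel p (t :: ts)).foldl PySem.Set.add S =
      (pvSel p ts).foldl PySem.Set.add (if pvKeep p t then PySem.Set.add S (pvVal p t) else S) := by
  rw [pv_sel_cons]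
  by_cases h : pvKeep p t
  · rw [if_pos h, if_pos h, List.foldl_cons]
  · rw [if_neg h, if_neg h]

lemma pv_loop_spec : ∀ (tags : List String) (A B C D : PySem.Set String),
    tags.foldl pvStepA (PySem.Dict.mk [("topic", A), ("scope", B), ("kind", C), ("layer", D)]) =
      PySem.Dict.mk
        [("topic", (pvSel "topic" tags).foldl PySem.Set.add A),
         ("scope", (pvSel "scope" tags).foldl PySem.Set.add B),
         ("kind",  (pvSel "kind" tags).foldl PySem.Set.add C),
         ("layer", (pvSel "layer" tags).foldl PySem.Set.add D)] := by
  intro tags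
  induction tags with
  | nil => intro A B C D; simp [pvSel]
  | cons t ts ih =>
    intro A B C D
    rw [List.foldl_cons, pv_step_spec, ih,
      pv_foldl_sel_cons, pv_foldl_sel_cons, pv_foldl_sel_cons, pv_foldl_sel_cons]

-- ===== VERDICT (by name: the statement is the Claim_ definition above) =====
theorem canonical_tag_map_spec : Claim_equal_canonical_tag_map := by
  intro tags _
  show canonical_tag_map tags = canonical_tag_map_alt tags
  rw [canonical_tag_map,
    show pvPrefixes.foldl (fun d p => d.insert p PySem.Set.empty) PySem.Dict.empty
      = PySem.Dict.mk [("topic", []), ("scope", []), ("kind", []), ("layer", [])] from by decide,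
    pv_loop_spec]
  rw [canonical_tag_map_alt]
  simp only [pvPrefixes, List.map_cons, List.map_nil, PySem.Dict.items]
  rfl
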